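-- pv_equiv track=rewrite | github.com/simonpainter/AdventOfCode | 2023/3/day3.py | get_number_at_position
-- ===== SOURCE A (Python) =====
-- def get_number_at_position(schematic, row, col):
--     # If we're not on a digit, return None
--     if not schematic[row][col].isdigit():
--         return None, None, None
--
--     # Find the start of the number
--     start = col
--     while start > 0 and schematic[row][start-1].isdigit():
--         start -= 1
--
--     # Find the end of the number
--     end = col
--     while end < len(schematic[row]) and schematic[row][end].isdigit():
--         end += 1
--
--     return int(schematic[row][start:end]), start, end
-- ===== SOURCE B (Python) =====
-- def get_number_at_position(schematic, row, col):
--     line = schematic[row]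
--     # If we're not on a digit, return None
--     if not line[col].isdigit():
--         return None, None, None
--
--     # Single forward scan over the row: close each digit run [start, i)
--     # and return the run that contains col.
--     start = None
--     for i, ch in enumerate(line):
--         if ch.isdigit():
--             if start is None:
--                 start = i
--         elif start is not None:
--             if start <= col < i:
--                 return int(line[start:i]), start, i
--             start = None
--     if start is not None and start <= col:
--         return int(line[start:]), start, len(line)
-- ===== Notes on version B (the rewrite author's own statement) =====
-- stated objective: alternative
-- what changed: B replaces A's bidirectional outward expansion from col with a single left-to-right scan of the row that closes digit runs and returns the run containing col.
-- outside the precondition, e.g. on get_number_at_position(['12'], 0, -1): A returns (2, -1, 2), B returns None; on get_number_at_position(['1a2'], 0, -1): A raises ValueError, B returns None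
import Mathlib
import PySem

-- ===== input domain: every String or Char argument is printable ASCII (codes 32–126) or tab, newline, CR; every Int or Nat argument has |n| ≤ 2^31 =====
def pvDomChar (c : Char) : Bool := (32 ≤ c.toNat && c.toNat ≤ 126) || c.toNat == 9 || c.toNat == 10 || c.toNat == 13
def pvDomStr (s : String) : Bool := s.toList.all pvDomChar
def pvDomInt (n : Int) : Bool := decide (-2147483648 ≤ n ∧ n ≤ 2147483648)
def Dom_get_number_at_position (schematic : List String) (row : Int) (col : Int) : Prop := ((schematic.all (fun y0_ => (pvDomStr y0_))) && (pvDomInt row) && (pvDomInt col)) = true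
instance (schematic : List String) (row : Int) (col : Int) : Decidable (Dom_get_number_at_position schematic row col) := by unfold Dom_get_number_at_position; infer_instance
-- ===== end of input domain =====

-- B replaces A's bidirectional expansion from col with a single forward scan that closes digit runs and returns the run containing col (alternative decomposition, same cost class).


-- ===== PORT A =====
-- s[i].isdigit() for a possibly negative index i (Python wraparound via pyGet?); the
-- getD false default is only reached where Python would raise IndexError (outside Pre_).
def pvDigAt (s : List Char) (i : Int) : Bool :=
  ((PySem.List.pyGet? s i).map PySem.Chars.isdigit).getD false

-- 'while start > 0 and schematic[row][start-1].isdigit(): start -= 1'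
def pvAStart (s : List Char) (start : Int) : Int :=
  if h : 0 < start ∧ pvDigAt s (start - 1) then pvAStart s (start - 1) else start
termination_by start.toNat
decreasing_by omega

-- 'while end < len(schematic[row]) and schematic[row][end].isdigit(): end += 1'
def pvAEnd (s : List Char) (e : Int) : Int :=
  if h : e < (s.length : Int) ∧ pvDigAt s e then pvAEnd s (e + 1) else e
termination_by ((s.length : Int) - e).toNat
decreasing_by omega

def get_number_at_position (schematic : List String) (row : Int) (col : Int) : Option Int × Option Int × Option Int :=
  match PySem.List.pyGet? schematic row with
  | none => (none, none, none)        -- IndexError (outside Pre_)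
  | some line =>
    let s := line.toList
    match PySem.List.pyGet? s col with
    | none => (none, none, none)      -- IndexError (outside Pre_)
    | some ch =>
      if !PySem.Chars.isdigit ch then (none, none, none)
      else
        let st := pvAStart s col
        let en := pvAEnd s col
        -- int(schematic[row][start:end]); ofChars? is none only where int() raises (outside Pre_)
        (some ((PySem.Int.ofChars? (PySem.List.slice s (some st) (some en))).getD 0), some st, some en)

-- ===== PORT B =====
-- the 'for i, ch in enumerate(line)' scan of Source B: i is the index, st the pending run start
def pvBLoop (line : List Char) (col : Int) : Nat → Option Nat → List Char → Option Int × Option Int × Option Int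
  | _, st, [] =>
    match st with
    | some s =>
      if (s : Int) ≤ col then
        (some ((PySem.Int.ofChars? (PySem.List.slice line (some (s : Int)) none)).getD 0),
         some (s : Int), some (line.length : Int))
      else (none, none, none)         -- Python B falls off and returns bare None (outside Pre_)
    | none => (none, none, none)      -- Python B falls off and returns bare None (outside Pre_)
  | i, st, ch :: rest =>
    if PySem.Chars.isdigit ch then
      pvBLoop line col (i + 1) (some (st.getD i)) rest
    else
      match st with
      | some s =>
        if (s : Int) ≤ col ∧ col < (i : Int) then
          (some ((PySem.Int.ofChars? (PySem.List.slice line (some (s : Int)) (some (i : Int)))).getD 0),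
           some (s : Int), some (i : Int))
        else pvBLoop line col (i + 1) none rest
      | none => pvBLoop line col (i + 1) none rest

def get_number_at_position_alt (schematic : List String) (row : Int) (col : Int) : Option Int × Option Int × Option Int :=
  match PySem.List.pyGet? schematic row with
  | none => (none, none, none)        -- IndexError (outside Pre_)
  | some line =>
    let s := line.toList
    match PySem.List.pyGet? s col with
    | none => (none, none, none)      -- IndexError (outside Pre_)
    | some ch =>
      if !PySem.Chars.isdigit ch then (none, none, none)
      else pvBLoop s col 0 none s

-- ===== PRECONDITION & SPEC =====
-- Pre_ excludes inputs where A raises IndexError (row or col out of range), and the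
-- negative in-range col positions holding a digit: there A's negative-index wraparound
-- makes its outward scan produce an accidental slice (or raise ValueError on int('')),
-- while B's forward scan finds no run containing a negative col and returns bare None.
def Pre_get_number_at_position (schematic : List String) (row : Int) (col : Int) : Prop :=
  (match PySem.List.pyGet? schematic row with
   | none => false
   | some line =>
     match PySem.List.pyGet? line.toList col with
     | none => false
     | some ch => decide (0 ≤ col) || !PySem.Chars.isdigit ch) = true
instance (schematic : List String) (row : Int) (col : Int) : Decidable (Pre_get_number_at_position schematic row col) := by unfold Pre_get_number_at_position; infer_instance

def pvWitness_get_number_at_position : List String × Int × Int := (["4a12"], 0, 3)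

def Spec_get_number_at_position (schematic : List String) (row : Int) (col : Int) (out : Option Int × Option Int × Option Int) : Prop := out = get_number_at_position_alt schematic row col
instance (schematic : List String) (row : Int) (col : Int) (out : Option Int × Option Int × Option Int) : Decidable (Spec_get_number_at_position schematic row col out) := by unfold Spec_get_number_at_position; infer_instance

-- ===== CLAIM (what is proved, stated in full; the proofs are below) =====
def Claim_equal_get_number_at_position : Prop := ∀ (schematic : List String) (row : Int) (col : Int), Dom_get_number_at_position schematic row col → Pre_get_number_at_position schematic row col → Spec_get_number_at_position schematic row col (get_number_at_position schematic row col)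

-- ===== LEMMAS AND PROOFS =====

-- digit test at a Nat index
def pvDigN (s : List Char) (j : Nat) : Bool := (s[j]?.map PySem.Chars.isdigit).getD false

theorem pvDigAt_natCast (s : List Char) (j : Nat) : pvDigAt s (j : Int) = pvDigN s j := by
  simp [pvDigAt, pvDigN]

-- Nat versions of A's two loops
def pvAStartN (s : List Char) : Nat → Nat
  | 0 => 0
  | n + 1 => if pvDigN s n then pvAStartN s n else n + 1

def pvAEndN (s : List Char) (e : Nat) : Nat :=
  if h : e < s.length ∧ pvDigN s e then pvAEndN s (e + 1) else e
termination_by s.length - e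
decreasing_by omega

theorem pvAStart_natCast (s : List Char) (c : Nat) : pvAStart s (c : Int) = ((pvAStartN s c : Nat) : Int) := by
  induction c with
  | zero => rw [pvAStart]; simp [pvAStartN]
  | succ n ih =>
    rw [pvAStart, pvAStartN]
    have h1 : ((n + 1 : Nat) : Int) - 1 = (n : Int) := by push_cast; ring
    by_cases hd : pvDigN s n = true
    · rw [dif_pos ⟨by positivity, by rw [h1, pvDigAt_natCast]; exact hd⟩, h1, ih, if_pos hd]
    · rw [dif_neg, if_neg hd]
      rintro ⟨-, hc⟩
      rw [h1, pvDigAt_natCast] at hc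
      exact hd hc

theorem pvAEnd_natCast (s : List Char) (e : Nat) : pvAEnd s (e : Int) = ((pvAEndN s e : Nat) : Int) := by
  fun_induction pvAEndN s e with
  | case1 e h ih =>
    rw [pvAEnd, dif_pos ⟨by exact_mod_cast h.1, by rw [pvDigAt_natCast]; exact h.2⟩]
    have hc : ((e : Int) + 1) = ((e + 1 : Nat) : Int) := by push_cast; ring
    rw [hc, ih]
  | case2 e h =>
    rw [pvAEnd, dif_neg]
    rintro ⟨h1, h2⟩
    rw [pvDigAt_natCast] at h2
    exact h ⟨by exact_mod_cast h1, h2⟩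

-- aStartN is determined by: run start s0 ≤ c, digits on [s0, c), nothing just before the run
theorem pvAStartN_eq (s : List Char) (c s0 : Nat) (h1 : s0 ≤ c)
    (h2 : ∀ j, s0 ≤ j → j < c → pvDigN s j = true)
    (h3 : s0 = 0 ∨ pvDigN s (s0 - 1) = false) : pvAStartN s c = s0 := by
  induction c with
  | zero =>
    have : s0 = 0 := by omega
    subst this; rfl
  | succ n ih =>
    rw [pvAStartN]
    by_cases he : s0 = n + 1
    · subst he
      rcases h3 with h | h
      · omega
      · simp only [Nat.add_sub_cancel] at h
        simp [h]
    · have hs0 : s0 ≤ n := by omega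
      have hd : pvDigN s n = true := h2 n hs0 (by omega)
      rw [if_pos hd]
      exact ih hs0 (fun j hj1 hj2 => h2 j hj1 (by omega))

-- phase 2 of B's scan: past col, inside the run started at sv
theorem pvBLoop_phase2 (s : List Char) (c : Nat) : ∀ (n k sv : Nat), s.length - k ≤ n →
    c < k → k ≤ s.length → sv ≤ c →
    (∀ j, sv ≤ j → j < k → pvDigN s j = true) →
    pvBLoop s (c : Int) k (some sv) (s.drop k) =
      (some ((PySem.Int.ofChars? (PySem.List.slice s (some (sv : Int)) (some ((pvAEndN s k : Nat) : Int)))).getD 0),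
       some (sv : Int), some ((pvAEndN s k : Nat) : Int)) := by
  intro n
  induction n with
  | zero =>
    intro k sv hf hk hkl hs _
    have hkl' : k = s.length := by omega
    rw [List.drop_eq_nil_of_le (by omega)]
    simp only [pvBLoop]
    have he : pvAEndN s k = k := by rw [pvAEndN]; simp [hkl']
    rw [if_pos (by exact_mod_cast hs : (sv:Int) ≤ (c:Int)), he, hkl']
    rw [PySem.List.slice_from_natCast, PySem.List.slice_natCast,
        List.take_of_length_le (by simp)]
  | succ n ih =>
    intro k sv hf hk hkl hs hrun
    rcases Nat.eq_or_lt_of_le hkl with he | hkl'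
    · rw [he, List.drop_length]
      simp only [pvBLoop]
      have hee : pvAEndN s s.length = s.length := by rw [pvAEndN]; simp
      rw [if_pos (by exact_mod_cast hs : (sv:Int) ≤ (c:Int)), hee]
      rw [PySem.List.slice_from_natCast, PySem.List.slice_natCast,
          List.take_of_length_le (by simp)]
    · have hdrop : s.drop k = s[k] :: s.drop (k + 1) := List.drop_eq_getElem_cons hkl'
      rw [hdrop]
      simp only [pvBLoop]
      by_cases hd : pvDigN s k = true
      · have hd' : PySem.Chars.isdigit s[k] = true := by
          simpa [pvDigN, List.getElem?_eq_getElem hkl'] using hd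
        rw [if_pos hd']
        have he : pvAEndN s k = pvAEndN s (k + 1) := by
          rw [pvAEndN, dif_pos ⟨hkl', hd⟩]
        simp only [Option.getD_some]
        rw [he]
        exact ih (k + 1) sv (by omega) (by omega) (by omega) hs
          (fun j hj1 hj2 => by rcases Nat.lt_or_ge j k with h | h
                               · exact hrun j hj1 h
                               · have : j = k := by omega
                                 rw [this]; exact hd)
      · have hd' : ¬ PySem.Chars.isdigit s[k] = true := by
          simpa [pvDigN, List.getElem?_eq_getElem hkl'] using hd
        rw [if_neg hd']
        have he : pvAEndN s k = k := by rw [pvAEndN, dif_neg (by tauto)]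
        rw [if_pos ⟨by exact_mod_cast hs, by exact_mod_cast hk⟩, he]

-- phase 1 of B's scan: before (or at) col
theorem pvBLoop_phase1 (s : List Char) (c : Nat) (hc : c < s.length)
    (hcd : pvDigN s c = true) : ∀ (n k : Nat) (st : Option Nat), c - k ≤ n → k ≤ c →
    (match st with
     | some sv => sv ≤ k ∧ (∀ j, sv ≤ j → j < k → pvDigN s j = true) ∧ (sv = 0 ∨ pvDigN s (sv - 1) = false)
     | none => k = 0 ∨ pvDigN s (k - 1) = false) →
    pvBLoop s (c : Int) k st (s.drop k) =
      (some ((PySem.Int.ofChars? (PySem.List.slice s (some ((pvAStartN s c : Nat) : Int)) (some ((pvAEndN s c : Nat) : Int)))).getD 0),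
       some ((pvAStartN s c : Nat) : Int), some ((pvAEndN s c : Nat) : Int)) := by
  have hstep : ∀ (k : Nat), k = c → ∀ (st : Option Nat),
      (match st with
       | some sv => sv ≤ k ∧ (∀ j, sv ≤ j → j < k → pvDigN s j = true) ∧ (sv = 0 ∨ pvDigN s (sv - 1) = false)
       | none => k = 0 ∨ pvDigN s (k - 1) = false) →
      pvBLoop s (c : Int) k st (s.drop k) =
        (some ((PySem.Int.ofChars? (PySem.List.slice s (some ((pvAStartN s c : Nat) : Int)) (some ((pvAEndN s c : Nat) : Int)))).getD 0),
         some ((pvAStartN s c : Nat) : Int), some ((pvAEndN s c : Nat) : Int)) := by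
    intro k hkc st hinv
    subst hkc
    have hdrop : s.drop k = s[k] :: s.drop (k + 1) := List.drop_eq_getElem_cons hc
    rw [hdrop]
    simp only [pvBLoop]
    have hd' : PySem.Chars.isdigit s[k] = true := by
      simpa [pvDigN, List.getElem?_eq_getElem hc] using hcd
    rw [if_pos hd']
    have hend : pvAEndN s k = pvAEndN s (k + 1) := by
      rw [pvAEndN, dif_pos ⟨hc, hcd⟩]
    rcases st with _ | sv
    · simp only [Option.getD_none]
      have hstart : pvAStartN s k = k := pvAStartN_eq s k k le_rfl (by omega) hinv
      rw [hstart, hend]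
      exact pvBLoop_phase2 s k (s.length - (k + 1)) (k + 1) k le_rfl (by omega) (by omega) le_rfl
        (fun j hj1 hj2 => by have : j = k := by omega
                             rw [this]; exact hcd)
    · simp only [Option.getD_some]
      obtain ⟨h1, h2, h3⟩ := hinv
      have hstart : pvAStartN s k = sv := pvAStartN_eq s k sv h1 h2 h3
      rw [hstart, hend]
      exact pvBLoop_phase2 s k (s.length - (k + 1)) (k + 1) sv le_rfl (by omega) (by omega) h1
        (fun j hj1 hj2 => by rcases Nat.lt_or_ge j k with h | h
                             · exact h2 j hj1 h
                             · have : j = k := by omega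
                               rw [this]; exact hcd)
  intro n
  induction n with
  | zero =>
    intro k st hf hk hinv
    exact hstep k (by omega) st hinv
  | succ n ih =>
    intro k st hf hk hinv
    rcases Nat.eq_or_lt_of_le hk with he | hkc
    · exact hstep k he st hinv
    · have hdrop : s.drop k = s[k] :: s.drop (k + 1) := List.drop_eq_getElem_cons (by omega)
      rw [hdrop]
      simp only [pvBLoop]
      by_cases hd : pvDigN s k = true
      · have hd' : PySem.Chars.isdigit s[k] = true := by
          simpa [pvDigN, List.getElem?_eq_getElem (by omega : k < s.length)] using hd
        rw [if_pos hd']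
        rcases st with _ | sv
        · simp only [Option.getD_none]
          exact ih (k + 1) (some k) (by omega) (by omega)
            ⟨by omega, fun j hj1 hj2 => by have : j = k := by omega
                                           rw [this]; exact hd, hinv⟩
        · simp only [Option.getD_some]
          obtain ⟨h1, h2, h3⟩ := hinv
          exact ih (k + 1) (some sv) (by omega) (by omega)
            ⟨by omega, fun j hj1 hj2 => by rcases Nat.lt_or_ge j k with h | h
                                           · exact h2 j hj1 h
                                           · have : j = k := by omega
                                             rw [this]; exact hd, h3⟩
      · have hd' : ¬ PySem.Chars.isdigit s[k] = true := by
          simpa [pvDigN, List.getElem?_eq_getElem (by omega : k < s.length)] using hd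
        rw [if_neg hd']
        rcases st with _ | sv
        · exact ih (k + 1) none (by omega) (by omega) (Or.inr (by simpa using hd))
        · dsimp only
          rw [if_neg (by rintro ⟨-, hlt⟩
                         have : (c : Int) < (k : Int) := hlt
                         omega)]
          exact ih (k + 1) none (by omega) (by omega) (Or.inr (by simpa using hd))

-- ===== VERDICT (by name: the statement is the Claim_ definition above) =====
theorem get_number_at_position_spec : Claim_equal_get_number_at_position := by
  intro schematic row col _ hpre
  unfold Spec_get_number_at_position
  unfold Pre_get_number_at_position at hpre
  unfold get_number_at_position get_number_at_position_alt
  cases h1 : PySem.List.pyGet? schematic row with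
  | none => rw [h1] at hpre
  | some line =>
    rw [h1] at hpre
    dsimp only at hpre ⊢
    cases h2 : PySem.List.pyGet? line.toList col with
    | none => rw [h2] at hpre
    | some ch =>
      rw [h2] at hpre
      dsimp only at hpre ⊢
      by_cases hd : PySem.Chars.isdigit ch = true
      · simp only [hd, Bool.not_true, Bool.false_eq_true, if_false]
        have hcol : 0 ≤ col := by
          simp [hd] at hpre
          exact hpre
        obtain ⟨c, rfl⟩ : ∃ c : Nat, col = (c : Int) := ⟨col.toNat, (Int.toNat_of_nonneg hcol).symm⟩
        rw [PySem.List.pyGet?_natCast] at h2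
        have hcl : c < line.toList.length := by
          by_contra h
          rw [List.getElem?_eq_none (by omega)] at h2
          simp at h2
        rw [List.getElem?_eq_getElem hcl] at h2
        have hch : line.toList[c] = ch := by injection h2
        have hcd : pvDigN line.toList c = true := by
          simp [pvDigN, List.getElem?_eq_getElem hcl, hch, hd]
        rw [pvAStart_natCast, pvAEnd_natCast]
        have := pvBLoop_phase1 line.toList c hcl hcd (c - 0) 0 none le_rfl (by omega) (Or.inl rfl)
        rw [List.drop_zero] at this
        rw [this]
      · simp [hd]
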